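-- pv_equiv track=rewrite | github.com/BoxBoxmari/Workflow | ui/workspace_controller.py | _events_by_step
-- ===== SOURCE A (Python) =====
-- from typing import Any, Callable, Optional
--
-- def _events_by_step(events: list[dict[str, Any]]) -> dict[str, list[dict[str, Any]]]:
--     grouped: dict[str, list[dict[str, Any]]] = {}
--     for ev in events:
--         step_id = str(ev.get("step_id") or "").strip()
--         if not step_id:
--             continue
--         normalized = dict(ev)
--         if "type" not in normalized and "event_type" in normalized:
--             normalized["type"] = normalized["event_type"]
--         grouped.setdefault(step_id, []).append(normalized)
--     return grouped
-- ===== SOURCE B (Python) =====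
-- def _normalize(ev):
--     out = dict(ev)
--     if "type" not in out and "event_type" in out:
--         out["type"] = out["event_type"]
--     return out
--
--
-- def _events_by_step(events):
--     tagged = [(str(ev.get("step_id") or "").strip(), ev) for ev in events]
--     pairs = [(s, _normalize(ev)) for s, ev in tagged if s]
--     keys = dict.fromkeys(s for s, _ in pairs)
--     return {k: [n for s, n in pairs if s == k] for k in keys}
-- ===== Notes on version B (the rewrite author's own statement) =====
-- stated objective: alternative
-- what changed: Replaces the single-pass dict setdefault-grouping with a filter pass producing (step_id, normalized) pairs, a dict.fromkeys ordered key list, and a per-key gather comprehension.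
import Mathlib
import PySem

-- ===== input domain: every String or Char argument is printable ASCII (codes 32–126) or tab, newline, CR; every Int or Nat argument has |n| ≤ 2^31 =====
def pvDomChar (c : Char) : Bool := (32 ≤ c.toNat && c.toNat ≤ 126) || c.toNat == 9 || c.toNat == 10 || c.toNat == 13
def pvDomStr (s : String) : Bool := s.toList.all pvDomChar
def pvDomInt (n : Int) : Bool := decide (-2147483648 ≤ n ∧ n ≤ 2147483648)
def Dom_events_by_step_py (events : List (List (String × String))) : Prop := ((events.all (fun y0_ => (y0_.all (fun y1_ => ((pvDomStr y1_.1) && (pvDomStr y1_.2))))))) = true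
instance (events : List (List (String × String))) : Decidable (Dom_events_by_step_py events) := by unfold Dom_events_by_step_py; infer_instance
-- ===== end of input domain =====

-- B replaces A's single-pass setdefault grouping by a filter pass + ordered key list (dict.fromkeys) + per-key gather; objective: alternative decomposition (return value only; neither mutates its input).


-- ===== PORT A =====
-- shared helpers (B's Python repeats A's step_id guard and event_type→type normalization verbatim):
-- step_id = str(ev.get("step_id") or "").strip()   (values are strings, so 'or ""' only replaces a falsy/missing value by "")
def pvStepId (ev : List (String × String)) : String :=
  PySem.Str.strip (((PySem.Dict.mk ev).get? "step_id").getD "")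
-- normalized = dict(ev); if "type" not in normalized and "event_type" in normalized: normalized["type"] = normalized["event_type"]
def pvNormalize (ev : List (String × String)) : List (String × String) :=
  match (PySem.Dict.mk ev).get? "type", (PySem.Dict.mk ev).get? "event_type" with
  | none, some v => ((PySem.Dict.mk ev).insert "type" v).items
  | _, _ => ev

def events_by_step_py (events : List (List (String × String))) : List (String × List (List (String × String))) :=
  (events.foldl
    (fun grouped ev =>
      let stepId := pvStepId ev
      if stepId = "" then grouped
      else grouped.modify stepId [] (· ++ [pvNormalize ev]))   -- grouped.setdefault(step_id, []).append(normalized)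
    PySem.Dict.empty).items

-- ===== PORT B =====
def events_by_step_py_alt (events : List (List (String × String))) : List (String × List (List (String × String))) :=
  let tagged := events.map (fun ev => (pvStepId ev, ev))
  let pairs := tagged.filterMap (fun p => if p.1 = "" then none else some (p.1, pvNormalize p.2))
  let keys := PySem.List.dedup (pairs.map (·.1))
  keys.map (fun k => (k, (pairs.filter (fun p => p.1 == k)).map (·.2)))

-- ===== PRECONDITION & SPEC =====
def Spec_events_by_step_py (events : List (List (String × String))) (out : List (String × List (List (String × String)))) : Prop := out = events_by_step_py_alt events
instance (events : List (List (String × String))) (out : List (String × List (List (String × String)))) : Decidable (Spec_events_by_step_py events out) := by unfold Spec_events_by_step_py; infer_instance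

-- ===== CLAIM (what is proved, stated in full; the proofs are below) =====
def Claim_equal_events_by_step_py : Prop := ∀ (events : List (List (String × String))), Dom_events_by_step_py events → Spec_events_by_step_py events (events_by_step_py events)

-- ===== LEMMAS AND PROOFS =====

-- A's loop, which skips empty step ids, equals the modify-fold over the filtered pair list.
theorem pv_foldl_skip (events : List (List (String × String)))
    (d : PySem.Dict String (List (List (String × String)))) :
    events.foldl
      (fun grouped ev =>
        let stepId := pvStepId ev
        if stepId = "" then grouped
        else grouped.modify stepId [] (· ++ [pvNormalize ev])) d
    = (events.filterMap (fun ev => if pvStepId ev = "" then none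
        else some (pvStepId ev, pvNormalize ev))).foldl
        (fun grouped p => grouped.modify p.1 [] (· ++ [p.2])) d := by
  induction events generalizing d with
  | nil => rfl
  | cons ev rest ih =>
    simp only [List.foldl_cons, List.filterMap_cons]
    by_cases h : pvStepId ev = "" <;> simp [h, ih]

-- ===== VERDICT (by name: the statement is the Claim_ definition above) =====
theorem events_by_step_py_spec : Claim_equal_events_by_step_py := by
  intro events _
  show events_by_step_py events = events_by_step_py_alt events
  unfold events_by_step_py events_by_step_py_alt
  rw [pv_foldl_skip]
  have hfm : (events.map (fun ev => (pvStepId ev, ev))).filterMap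
      (fun p => if p.1 = "" then none else some (p.1, pvNormalize p.2))
      = events.filterMap (fun ev => if pvStepId ev = "" then none
          else some (pvStepId ev, pvNormalize ev)) := by
    rw [List.filterMap_map]; rfl
  simp only [hfm]
  set ps := events.filterMap (fun ev => if pvStepId ev = "" then none
      else some (pvStepId ev, pvNormalize ev)) with hps
  set D := ps.foldl (fun grouped p => grouped.modify p.1 [] (· ++ [p.2])) PySem.Dict.empty with hD
  have hnd : D.keys.Nodup := by
    have := PySem.Dict.nodup_keys_foldl_modify_key ps (Prod.fst)
      ([] : List (List (String × String))) (fun _ p => (· ++ [p.2]))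
      (PySem.Dict.empty) (by simp only [PySem.Dict.keys_empty, List.nodup_nil])
    simpa only [hD] using this
  have hitems := PySem.Dict.items_eq_map_keys D hnd ([] : List (List (String × String)))
  have hkeys : D.keys = PySem.List.dedup (ps.map (·.1)) := by
    have := PySem.Dict.keys_foldl_modify_key ps (Prod.fst)
      ([] : List (List (String × String))) (fun _ p => (· ++ [p.2])) (PySem.Dict.empty)
    simpa only [hD, PySem.Dict.keys_empty, PySem.Set.update_nil_left,
      PySem.List.dedup_eq_ofList] using this
  have hgetD : ∀ k, D.getD k [] = (ps.filter (fun p => p.1 == k)).map (·.2) := by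
    intro k
    have := PySem.Dict.getD_foldl_modify_append ps (PySem.Dict.empty) k
    simpa only [hD, PySem.Dict.getD_empty, List.nil_append] using this
  rw [hitems, hkeys]
  exact List.map_congr_left (fun k _ => by rw [hgetD k])
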